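-- pv_equiv track=rewrite | github.com/jjpd777/hdf5_generator | utils/preprocess_utils.py | select_sister_sirna
-- ===== SOURCE A (Python) =====
-- def select_sister_sirna(original_data,val_test_subset):
--     sister_sirna = []
--     [original_data.remove(x) for x in val_test_subset]
--     for image in val_test_subset:
--        substring = image[:-6]
--        for og in original_data:
--            if substring in og:
--                sister_sirna.append(og)
--     result_val_test = val_test_subset + sister_sirna
--     return (original_data, result_val_test)
--
--     return
-- ===== SOURCE B (Python) =====
-- def select_sister_sirna(original_data, val_test_subset):
--     # counter-based removal: count what must go, check feasibility up front
--     # (same ValueError contract as list.remove on a missing element), then one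
--     # pass over original_data; matches for each distinct prefix are computed
--     # once via a memo dict instead of rescanning the survivors per image
--     need = {}
--     for x in val_test_subset:
--         need[x] = need.get(x, 0) + 1
--     have = {}
--     for og in original_data:
--         have[og] = have.get(og, 0) + 1
--     for x in need:
--         if have.get(x, 0) < need[x]:
--             raise ValueError("list.remove(x): x not in list")
--     kept = []
--     for og in original_data:
--         c = need.get(og, 0)
--         if c > 0:
--             need[og] = c - 1
--         else:
--             kept.append(og)
--     original_data[:] = kept  # same in-place mutation as A
--     memo = {}
--     sisters = []
--     for image in val_test_subset:
--         sub = image[:-6]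
--         if sub not in memo:
--             memo[sub] = [og for og in kept if sub in og]
--         sisters += memo[sub]
--     return (original_data, val_test_subset + sisters)
-- ===== Notes on version B (the rewrite author's own statement) =====
-- stated objective: faster
-- what changed: removal of val/test items becomes a counter build + one feasibility check + one pass over original_data instead of V repeated O(n) list.remove calls (same ValueError contract), and matches for each distinct prefix are computed once via a memo dict instead of rescanning the survivors per image
import Mathlib
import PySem

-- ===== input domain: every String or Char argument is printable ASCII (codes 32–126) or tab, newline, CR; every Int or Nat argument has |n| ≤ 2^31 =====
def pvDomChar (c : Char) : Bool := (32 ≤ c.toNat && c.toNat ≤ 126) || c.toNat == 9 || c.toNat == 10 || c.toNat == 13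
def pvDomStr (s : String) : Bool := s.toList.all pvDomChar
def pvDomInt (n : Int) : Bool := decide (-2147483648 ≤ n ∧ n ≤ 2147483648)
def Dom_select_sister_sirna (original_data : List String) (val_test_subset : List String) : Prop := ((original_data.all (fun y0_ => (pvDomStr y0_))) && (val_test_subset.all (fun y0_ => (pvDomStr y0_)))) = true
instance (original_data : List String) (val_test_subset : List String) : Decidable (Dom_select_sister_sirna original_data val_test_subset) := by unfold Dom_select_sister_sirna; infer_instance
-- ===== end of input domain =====

-- B replaces A's repeated list.remove with one counter-guided pass and memoizes the
-- per-prefix scan of the survivors; A mutates original_data in place, B performs the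
-- same mutation (original_data[:] = kept), and the equivalence proved is about the return value.

-- ===== PORT A =====
-- '[original_data.remove(x) for x in val_test_subset]' — sequential removes; none = ValueError
def pvRemoveFold (data : List String) (vts : List String) : Option (List String) :=
  vts.foldl (fun o x => o.bind (fun d => PySem.List.remove? d x)) (some data)

def select_sister_sirna (original_data : List String) (val_test_subset : List String) : List String × List String :=
  match pvRemoveFold original_data val_test_subset with
  | none => ([], [])   -- Python raises ValueError here; excluded by Pre_
  | some od =>
    let sisters := val_test_subset.foldl (fun acc image =>
      let substring := PySem.Str.slice image none (some (-6))
      od.foldl (fun acc og => if PySem.Str.isIn substring og then acc ++ [og] else acc) acc) []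
    (od, val_test_subset ++ sisters)

-- ===== PORT B =====
def select_sister_sirna_alt (original_data : List String) (val_test_subset : List String) : List String × List String :=
  -- need[x] = need.get(x, 0) + 1
  let need : PySem.Dict String Int :=
    val_test_subset.foldl (fun d x => d.insert x (d.getD x 0 + 1)) PySem.Dict.empty
  let have_ : PySem.Dict String Int :=
    original_data.foldl (fun d x => d.insert x (d.getD x 0 + 1)) PySem.Dict.empty
  -- feasibility check; Python raises ValueError on this branch (excluded by Pre_)
  if need.keys.any (fun x => decide (have_.getD x 0 < need.getD x 0)) then ([], [])
  else
    -- one pass over original_data keeping elements whose remaining count is 0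
    let st := original_data.foldl
      (fun (st : PySem.Dict String Int × List String) og =>
        let c := st.1.getD og 0
        if c > 0 then (st.1.insert og (c - 1), st.2)
        else (st.1, st.2 ++ [og]))
      (need, [])
    let kept := st.2
    -- memoized prefix scan
    let ms := val_test_subset.foldl
      (fun (ms : PySem.Dict String (List String) × List String) image =>
        let sub := PySem.Str.slice image none (some (-6))
        let memo := if ms.1.contains sub then ms.1
                    else ms.1.insert sub (kept.filter (fun og => PySem.Str.isIn sub og))
        (memo, ms.2 ++ memo.getD sub []))
      (PySem.Dict.empty, [])
    (kept, val_test_subset ++ ms.2)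

-- ===== PRECONDITION & SPEC =====
-- Pre_ excludes exactly the inputs on which A's list.remove raises ValueError:
-- some element of val_test_subset occurs more often there than in original_data.
def Pre_select_sister_sirna (original_data : List String) (val_test_subset : List String) : Prop :=
  ∀ x ∈ val_test_subset, val_test_subset.count x ≤ original_data.count x
instance (original_data : List String) (val_test_subset : List String) : Decidable (Pre_select_sister_sirna original_data val_test_subset) := by unfold Pre_select_sister_sirna; infer_instance

def pvWitness_select_sister_sirna : List String × List String := (["ax12345", "axz", "bq"], ["ax12345"])

def Spec_select_sister_sirna (original_data : List String) (val_test_subset : List String) (out : List String × List String) : Prop := out = select_sister_sirna_alt original_data val_test_subset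
instance (original_data : List String) (val_test_subset : List String) (out : List String × List String) : Decidable (Spec_select_sister_sirna original_data val_test_subset out) := by unfold Spec_select_sister_sirna; infer_instance

-- ===== CLAIM =====
def Claim_equal_select_sister_sirna : Prop := ∀ (original_data : List String) (val_test_subset : List String), Dom_select_sister_sirna original_data val_test_subset → Pre_select_sister_sirna original_data val_test_subset → Spec_select_sister_sirna original_data val_test_subset (select_sister_sirna original_data val_test_subset)


-- ===== LEMMAS AND PROOFS =====

-- abstract "filter by remaining count" function
def pvFC (g : String → Nat) : List String → List String
  | [] => []
  | og :: t => if g og > 0 then pvFC (fun s => if s = og then g og - 1 else g s) t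
               else og :: pvFC g t

theorem pvFC_congr (g g' : String → Nat) (h : ∀ s, g s = g' s) (l : List String) :
    pvFC g l = pvFC g' l := by
  induction l generalizing g g' with
  | nil => rfl
  | cons og t ih =>
    simp only [pvFC, h og]
    split_ifs with hc
    · exact ih _ _ (by intro s; split_ifs with hs <;> simp [hs, h])
    · rw [ih _ _ h]

-- A's removal under Pre_ equals the fold of List.erase
theorem pvRemoveFold_eq (vts : List String) : ∀ (od : List String),
    (∀ x ∈ vts, vts.count x ≤ od.count x) →
    pvRemoveFold od vts = some (vts.foldl (fun d x => d.erase x) od) := by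
  induction vts with
  | nil => intro od _; rfl
  | cons x rest ih =>
    intro od h
    have hx : x ∈ od := by
      have := h x (by simp)
      have : 1 ≤ od.count x := by
        have hcx : 1 ≤ (x :: rest).count x := by simp
        omega
      exact List.one_le_count_iff.mp this
    have hstep : PySem.List.remove? od x = some (od.erase x) :=
      PySem.List.remove?_eq_some_erase od x hx
    have hrest : ∀ y ∈ rest, rest.count y ≤ (od.erase x).count y := by
      intro y hy
      by_cases hxy : y = x
      · subst hxy
        have := h y (by simp)
        rw [List.count_erase_self]
        simp [List.count_cons_self] at this ⊢
        omega
      · have := h y (by simp [hy])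
        rw [List.count_erase_of_ne hxy]
        simp only [List.count_cons, if_neg (fun h : x = y => hxy h.symm)] at this
        omega
    have : pvRemoveFold od (x :: rest)
        = pvRemoveFold (od.erase x) rest := by
      simp [pvRemoveFold, hstep]
    rw [this, ih _ hrest]
    simp [List.foldl_cons]

-- the erase fold passes an absent head through
theorem pvFoldlErase_not_mem (og : String) (vts : List String) (hog : og ∉ vts) :
    ∀ t : List String, vts.foldl (fun d x => d.erase x) (og :: t)
      = og :: vts.foldl (fun d x => d.erase x) t := by
  induction vts with
  | nil => intro t; rfl
  | cons y ys ihv =>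
    intro t
    have hy : y ≠ og := fun h => hog (by simp [h])
    have hstep : (og :: t).erase y = og :: t.erase y := by
      rw [List.erase_cons_tail]
      simp [beq_iff_eq]; exact fun h => hy h.symm
    simp only [List.foldl_cons, hstep]
    exact ihv (fun h => hog (by simp [h])) (t.erase y)

-- the erase fold consumes a present head
theorem pvFoldlErase_mem (og : String) (vts : List String) (hog : og ∈ vts) :
    ∀ t : List String, vts.foldl (fun d x => d.erase x) (og :: t)
      = (vts.erase og).foldl (fun d x => d.erase x) t := by
  induction vts with
  | nil => simp at hog
  | cons y ys ihv =>
    intro t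
    by_cases hy : y = og
    · subst hy; simp [List.erase_cons_head]
    · have hog' : og ∈ ys := by
        rcases List.mem_cons.mp hog with h1 | h1
        · exact absurd h1.symm hy
        · exact h1
      have hstep : (og :: t).erase y = og :: t.erase y := by
        rw [List.erase_cons_tail]
        simp [beq_iff_eq]; exact fun h => hy h.symm
      have herase : (y :: ys).erase og = y :: ys.erase og := by
        rw [List.erase_cons_tail]
        simp [beq_iff_eq]; exact hy
      simp only [List.foldl_cons, hstep, herase]
      exact ihv hog' (t.erase y)

-- the erase fold equals pvFC of counts (unconditionally)
theorem pvFC_count (od : List String) : ∀ (vts : List String),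
    pvFC (fun s => vts.count s) od = vts.foldl (fun d x => d.erase x) od := by
  induction od with
  | nil =>
    intro vts
    simp only [pvFC]
    induction vts with
    | nil => rfl
    | cons y ys ihv => simpa using ihv
  | cons og t ih =>
    intro vts
    by_cases hog : og ∈ vts
    · have hpos : vts.count og > 0 := List.count_pos_iff.mpr hog
      rw [pvFoldlErase_mem og vts hog t]
      simp only [pvFC, if_pos hpos]
      rw [pvFC_congr _ (fun s => (vts.erase og).count s) ?_ t, ih]
      intro s
      by_cases hs : s = og
      · subst hs; simp [List.count_erase_self]
      · simp [hs, List.count_erase_of_ne hs]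
    · have hz : vts.count og = 0 := List.count_eq_zero.mpr hog
      rw [pvFoldlErase_not_mem og vts hog t]
      simp only [pvFC, if_neg (by omega : ¬ vts.count og > 0)]
      rw [ih]

-- B's counter build: getD reads off the count
theorem pvNeed_getD (vts : List String) : ∀ (d : PySem.Dict String Int) (v : String),
    (vts.foldl (fun d x => d.insert x (d.getD x 0 + 1)) d).getD v 0
      = d.getD v 0 + vts.count v := by
  induction vts with
  | nil => intro d v; simp
  | cons x rest ih =>
    intro d v
    simp only [List.foldl_cons]
    rw [ih]
    rw [PySem.Dict.getD_insert]
    by_cases hv : v = x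
    · subst hv; simp [List.count_cons_self]; ring
    · simp [hv, List.count_cons, Ne.symm hv]

-- B's removal pass computes pvFC of the dict's counts
theorem pvPassB (od : List String) : ∀ (d : PySem.Dict String Int) (acc : List String),
    (od.foldl
      (fun (st : PySem.Dict String Int × List String) og =>
        let c := st.1.getD og 0
        if c > 0 then (st.1.insert og (c - 1), st.2)
        else (st.1, st.2 ++ [og]))
      (d, acc)).2
    = acc ++ pvFC (fun s => (d.getD s 0).toNat) od := by
  induction od with
  | nil => intro d acc; simp [pvFC]
  | cons og t ih =>
    intro d acc
    simp only [List.foldl_cons]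
    by_cases hc : d.getD og 0 > 0
    · simp only [hc, if_pos, pvFC]
      have hpos : (d.getD og 0).toNat > 0 := by omega
      rw [if_pos hpos, ih]
      congr 1
      apply pvFC_congr
      intro s
      rw [PySem.Dict.getD_insert]
      by_cases hs : s = og
      · subst hs; rw [if_pos rfl, if_pos rfl]; omega
      · rw [if_neg hs, if_neg hs]
    · simp only [hc, if_neg, pvFC]
      have : ¬ (d.getD og 0).toNat > 0 := by omega
      rw [if_neg this, ih]
      simp

-- memo invariant for B's sister loop
theorem pvMemo (kept : List String) (vts : List String) :
    ∀ (memo : PySem.Dict String (List String)) (acc : List String),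
    (∀ k, memo.contains k = true →
        memo.getD k [] = kept.filter (fun og => PySem.Str.isIn k og)) →
    (vts.foldl
      (fun (ms : PySem.Dict String (List String) × List String) image =>
        let sub := PySem.Str.slice image none (some (-6))
        let memo := if ms.1.contains sub then ms.1
                    else ms.1.insert sub (kept.filter (fun og => PySem.Str.isIn sub og))
        (memo, ms.2 ++ memo.getD sub []))
      (memo, acc)).2
    = vts.foldl
        (fun acc image => acc ++ kept.filter
            (fun og => PySem.Str.isIn (PySem.Str.slice image none (some (-6))) og)) acc := by
  induction vts with
  | nil => intro memo acc _; simp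
  | cons image rest ih =>
    intro memo acc hinv
    simp only [List.foldl_cons]
    by_cases hco : memo.contains (PySem.Str.slice image none (some (-6))) = true
    · simp only [hco, if_pos]
      rw [ih _ _ hinv, hinv _ hco]
    · simp only [hco, if_neg, Bool.not_eq_true]
      rw [ih]
      · congr 2
        rw [PySem.Dict.getD_insert]
        simp
      · intro k hk
        rw [PySem.Dict.getD_insert]
        by_cases hks : k = PySem.Str.slice image none (some (-6))
        · subst hks; simp
        · rw [if_neg hks]
          apply hinv
          rw [PySem.Dict.contains_insert] at hk
          simpa [beq_iff_eq, hks] using hk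

-- ===== VERDICT =====
theorem select_sister_sirna_spec : Claim_equal_select_sister_sirna := by
  intro od vts hdom hpre
  clear hdom
  unfold Spec_select_sister_sirna select_sister_sirna select_sister_sirna_alt
  rw [pvRemoveFold_eq vts od hpre]
  simp only
  have hguard :
      ¬ (((vts.foldl (fun d x => d.insert x (d.getD x 0 + 1)) (PySem.Dict.empty : PySem.Dict String Int)).keys.any
        (fun x => decide ((od.foldl (fun d x => d.insert x (d.getD x 0 + 1)) (PySem.Dict.empty : PySem.Dict String Int)).getD x 0
          < (vts.foldl (fun d x => d.insert x (d.getD x 0 + 1)) (PySem.Dict.empty : PySem.Dict String Int)).getD x 0))) = true) := by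
    rw [Bool.not_eq_true, List.any_eq_false]
    intro x hx
    have hxv : x ∈ vts := by
      rw [PySem.Dict.keys_foldl_insert] at hx
      simpa [PySem.Set.mem_update, PySem.Dict.keys_empty] using hx
    simp only [decide_eq_true_eq, not_lt]
    rw [pvNeed_getD od PySem.Dict.empty x, pvNeed_getD vts PySem.Dict.empty x,
      PySem.Dict.getD_empty]
    have := hpre x hxv
    push_cast
    omega
  rw [if_neg hguard]
  have hkept :
      (od.foldl
        (fun (st : PySem.Dict String Int × List String) og =>
          let c := st.1.getD og 0
          if c > 0 then (st.1.insert og (c - 1), st.2)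
          else (st.1, st.2 ++ [og]))
        (vts.foldl (fun d x => d.insert x (d.getD x 0 + 1)) PySem.Dict.empty, [])).2
      = vts.foldl (fun d x => d.erase x) od := by
    rw [pvPassB]
    rw [pvFC_congr _ (fun s => vts.count s) ?_ od, pvFC_count]
    · simp
    · intro s
      rw [pvNeed_getD]
      simp
  refine Prod.ext ?_ ?_
  · simpa using hkept.symm
  · simp only
    congr 1
    rw [pvMemo _ _ _ _ (by intro k hk; simp [PySem.Dict.contains_empty] at hk)]
    rw [hkept]
    generalize (vts.foldl (fun d x => d.erase x) od) = kept
    clear hkept hpre hguard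
    induction vts using List.reverseRecOn with
    | nil => rfl
    | append_singleton rest image ihv =>
      simp only [List.foldl_append, List.foldl_cons, List.foldl_nil, ← ihv]
      rw [PySem.List.foldl_append_if]
      simp only [List.map_id']
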